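-- pv_equiv track=rewrite | github.com/ltc1996/Leetcode | Solutions/Solution.py | numTeams
-- ===== SOURCE A (Python) =====
-- def numTeams(rating):
--     from itertools import combinations
--     n = len(rating)
--     if n <= 2:
--         return 0
--     count = 0
--     c = combinations(range(n), 3)
--     for i, j, k in c:
--         if rating[i] < rating[j] < rating[k] or rating[i] > rating[j] > rating[k]:
--             count += 1
--     return count
-- ===== SOURCE B (Python) =====
-- def numTeams(rating):
--     n = len(rating)
--     total = 0
--     for j in range(n):
--         x = rating[j]
--         ls = len([y for y in rating[:j] if y < x])
--         lg = len([y for y in rating[:j] if y > x])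
--         rs = len([y for y in rating[j+1:] if y < x])
--         rg = len([y for y in rating[j+1:] if y > x])
--         total += ls * rg + lg * rs
--     return total
-- ===== Notes on version B (the rewrite author's own statement) =====
-- stated objective: faster
-- what changed: Replaces the O(n^3) scan over all index triples by fixing each middle element j and multiplying counts of smaller/larger elements on the left and right (O(n^2)).
import Mathlib
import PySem

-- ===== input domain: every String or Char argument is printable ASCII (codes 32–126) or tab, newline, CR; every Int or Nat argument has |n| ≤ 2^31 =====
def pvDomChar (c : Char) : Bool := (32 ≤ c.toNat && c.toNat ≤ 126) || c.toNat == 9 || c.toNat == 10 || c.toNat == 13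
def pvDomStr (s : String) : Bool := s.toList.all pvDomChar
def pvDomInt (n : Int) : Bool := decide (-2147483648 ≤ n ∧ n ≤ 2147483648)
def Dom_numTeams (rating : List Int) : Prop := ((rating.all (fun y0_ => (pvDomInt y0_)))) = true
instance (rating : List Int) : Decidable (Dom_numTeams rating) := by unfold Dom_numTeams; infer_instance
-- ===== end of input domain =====

-- B replaces A's scan of all index triples by, for each middle index j,
-- multiplying counts of smaller/larger elements to its left and right.

-- ===== PORT A =====
-- combinations(range(n), 3) is transliterated as the guarded triple loop over
-- i, j, k in range(n) with the guards i < j and j < k (same triples, same order).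
def numTeams (rating : List Int) : Int :=
  let n := rating.length
  if n ≤ 2 then 0
  else
    (List.range n).foldl (fun count i =>
      (List.range n).foldl (fun count j =>
        if i < j then
          (List.range n).foldl (fun count k =>
            if j < k then
              if (rating.getD i 0 < rating.getD j 0 ∧ rating.getD j 0 < rating.getD k 0) ∨
                 (rating.getD i 0 > rating.getD j 0 ∧ rating.getD j 0 > rating.getD k 0) then
                count + 1
              else count
            else count) count
        else count) count) 0

-- ===== PORT B =====
def numTeams_alt (rating : List Int) : Int :=
  (List.range rating.length).foldl (fun total j =>
    let x := rating.getD j 0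
    let ls : Int := ((rating.take j).filter (fun y => y < x)).length
    let lg : Int := ((rating.take j).filter (fun y => y > x)).length
    let rs : Int := ((rating.drop (j+1)).filter (fun y => y < x)).length
    let rg : Int := ((rating.drop (j+1)).filter (fun y => y > x)).length
    total + (ls * rg + lg * rs)) 0

-- ===== PRECONDITION & SPEC =====
def Spec_numTeams (rating : List Int) (out : Int) : Prop := out = numTeams_alt rating
instance (rating : List Int) (out : Int) : Decidable (Spec_numTeams rating out) := by unfold Spec_numTeams; infer_instance

-- ===== CLAIM (what is proved, stated in full; the proofs are below) =====
def Claim_equal_numTeams : Prop := ∀ (rating : List Int), Dom_numTeams rating → Spec_numTeams rating (numTeams rating)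

-- ===== LEMMAS AND PROOFS =====

-- a foldl whose step adds a value independent of the accumulator is a sum
theorem pv_foldl_gen (l : List ℕ) (f : ℤ → ℕ → ℤ) (g : ℕ → ℤ)
    (h : ∀ acc x, x ∈ l → f acc x = acc + g x) (a : ℤ) :
    l.foldl f a = a + ((l.map g).sum) := by
  induction l generalizing a with
  | nil => simp
  | cons x xs ih =>
    simp only [List.foldl, List.map, List.sum_cons]
    rw [h a x (List.mem_cons_self), ih (fun acc y hy => h acc y (List.mem_cons_of_mem x hy))]
    ring

theorem pv_sum_map_range (n : ℕ) (g : ℕ → ℤ) :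
    ((List.range n).map g).sum = ∑ i ∈ Finset.range n, g i := by
  induction n with
  | zero => simp
  | succ m ih => simp [List.range_succ, Finset.sum_range_succ, ih]

-- truncate a guarded sum to the guard's range
theorem pv_sum_trunc_lt (n j : ℕ) (hj : j ≤ n) (g : ℕ → ℤ) :
    (∑ i ∈ Finset.range n, if i < j then g i else 0) = ∑ i ∈ Finset.range j, g i := by
  have hsub : Finset.range j ⊆ Finset.range n := by
    intro x hx; simp [Finset.mem_range] at hx ⊢; omega
  have hv : ∀ x ∈ Finset.range n, x ∉ Finset.range j →
      (if x < j then g x else 0) = 0 := by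
    intro x _ hx
    rw [if_neg (by simpa [Finset.mem_range] using hx)]
  rw [← Finset.sum_subset hsub hv]
  exact Finset.sum_congr rfl (fun i hi => by simp [Finset.mem_range.mp hi])

theorem pv_sum_trunc_gt (n j : ℕ) (g : ℕ → ℤ) :
    (∑ k ∈ Finset.range n, if j < k then g k else 0)
      = ∑ i ∈ Finset.range (n - (j+1)), g (j + 1 + i) := by
  have h1 : (∑ k ∈ Finset.range n, if j < k then g k else 0)
      = ∑ k ∈ Finset.Ico (j+1) n, g k := by
    rw [Finset.range_eq_Ico]
    have hsub : Finset.Ico (j+1) n ⊆ Finset.Ico 0 n :=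
      Finset.Ico_subset_Ico (Nat.zero_le _) le_rfl
    have hv : ∀ x ∈ Finset.Ico 0 n, x ∉ Finset.Ico (j+1) n →
        (if j < x then g x else 0) = 0 := by
      intro x hx hxn
      simp [Finset.mem_Ico] at hx hxn
      rw [if_neg (by omega)]
    rw [← Finset.sum_subset hsub hv]
    exact Finset.sum_congr rfl (fun k hk => by
      simp [Finset.mem_Ico] at hk
      simp [Nat.lt_of_succ_le hk.1])
  rw [h1, Finset.sum_Ico_eq_sum_range]

-- counting in a prefix as an index sum
theorem pv_count_take (l : List Int) (p : Int → Bool) (j : ℕ) (hj : j ≤ l.length) :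
    (((l.take j).filter p).length : ℤ)
      = ∑ i ∈ Finset.range j, (if p (l.getD i 0) then (1:ℤ) else 0) := by
  induction j with
  | zero => simp
  | succ m ih =>
    have hm : m ≤ l.length := Nat.le_of_succ_le hj
    have hml : m < l.length := Nat.lt_of_succ_le hj
    rw [Finset.sum_range_succ, ← ih hm]
    have ht : l.take (m+1) = l.take m ++ [l.getD m 0] := by
      rw [List.take_add_one]
      congr 1
      simp [List.getD_eq_getElem?_getD, List.getElem?_eq_getElem hml]
    rw [ht, List.filter_append, List.length_append]
    rw [List.getD_eq_getElem?_getD]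
    by_cases hp : p ((l[m]?).getD 0) <;> simp [List.filter, hp]
-- counting in a suffix as an index sum
theorem pv_count_drop (l : List Int) (p : Int → Bool) (m : ℕ) :
    (((l.drop m).filter p).length : ℤ)
      = ∑ i ∈ Finset.range (l.length - m), (if p (l.getD (m + i) 0) then (1:ℤ) else 0) := by
  have h := pv_count_take (l.drop m) p (l.length - m) (by simp)
  rw [List.take_of_length_le (by simp)] at h
  rw [h]
  refine Finset.sum_congr rfl (fun i hi => ?_)
  congr 2
  simp [List.getD_eq_getElem?_getD, List.getElem?_drop]

-- the middle-index form of the count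
def pvMid (rating : List Int) (j : ℕ) : ℤ :=
  let x := rating.getD j 0
  (∑ i ∈ Finset.range j, if rating.getD i 0 < x then (1:ℤ) else 0)
    * (∑ i ∈ Finset.range (rating.length - (j+1)), if x < rating.getD (j+1+i) 0 then (1:ℤ) else 0)
  + (∑ i ∈ Finset.range j, if rating.getD i 0 > x then (1:ℤ) else 0)
    * (∑ i ∈ Finset.range (rating.length - (j+1)), if x > rating.getD (j+1+i) 0 then (1:ℤ) else 0)

-- the guarded triple sum computed by A's loops
def pvT (rating : List Int) : ℤ :=
  ∑ i ∈ Finset.range rating.length, ∑ j ∈ Finset.range rating.length,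
    if i < j then
      (∑ k ∈ Finset.range rating.length,
        if j < k then
          (if (rating.getD i 0 < rating.getD j 0 ∧ rating.getD j 0 < rating.getD k 0) ∨
              (rating.getD i 0 > rating.getD j 0 ∧ rating.getD j 0 > rating.getD k 0) then (1:ℤ) else 0)
        else 0)
    else 0

theorem pv_B_eq (rating : List Int) :
    numTeams_alt rating = ∑ j ∈ Finset.range rating.length, pvMid rating j := by
  unfold numTeams_alt
  rw [pv_foldl_gen _ _ (fun j => pvMid rating j) ?h, pv_sum_map_range, zero_add]
  intro acc j hj
  have hjn : j < rating.length := List.mem_range.mp hj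
  simp only [pvMid]
  rw [pv_count_take _ _ j (le_of_lt hjn), pv_count_take _ _ j (le_of_lt hjn),
      pv_count_drop, pv_count_drop]
  simp [gt_iff_lt]

theorem pv_A_eq (rating : List Int) (h : ¬ rating.length ≤ 2) :
    numTeams rating = pvT rating := by
  unfold numTeams pvT
  simp only [h, if_false]
  rw [pv_foldl_gen _ _ (fun i => ∑ j ∈ Finset.range rating.length,
      if i < j then
        (∑ k ∈ Finset.range rating.length,
          if j < k then
            (if (rating.getD i 0 < rating.getD j 0 ∧ rating.getD j 0 < rating.getD k 0) ∨
                (rating.getD i 0 > rating.getD j 0 ∧ rating.getD j 0 > rating.getD k 0) then (1:ℤ) else 0)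
          else 0)
      else 0) ?hi, pv_sum_map_range, zero_add]
  intro acc i _
  rw [pv_foldl_gen _ _ (fun j =>
      if i < j then
        (∑ k ∈ Finset.range rating.length,
          if j < k then
            (if (rating.getD i 0 < rating.getD j 0 ∧ rating.getD j 0 < rating.getD k 0) ∨
                (rating.getD i 0 > rating.getD j 0 ∧ rating.getD j 0 > rating.getD k 0) then (1:ℤ) else 0)
          else 0)
      else 0) ?hj, pv_sum_map_range]
  intro acc j _
  by_cases hij : i < j
  · simp only [hij, if_true]
    rw [pv_foldl_gen _ _ (fun k =>
        if j < k then
          (if (rating.getD i 0 < rating.getD j 0 ∧ rating.getD j 0 < rating.getD k 0) ∨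
              (rating.getD i 0 > rating.getD j 0 ∧ rating.getD j 0 > rating.getD k 0) then (1:ℤ) else 0)
        else 0) ?hk, pv_sum_map_range]
    intro acc k _
    split_ifs <;> simp_all <;> ring
  · simp [hij]

theorem pv_T_eq (rating : List Int) :
    pvT rating = ∑ j ∈ Finset.range rating.length, pvMid rating j := by
  unfold pvT
  rw [Finset.sum_comm]
  refine Finset.sum_congr rfl (fun j hj => ?_)
  have hjn : j < rating.length := Finset.mem_range.mp hj
  set n := rating.length with hn
  set r : ℕ → ℤ := fun i => rating.getD i 0 with hr
  -- rewrite each inner term as a linear combination of two indicator products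
  have key : ∀ i, (if i < j then
      (∑ k ∈ Finset.range n,
        if j < k then (if (r i < r j ∧ r j < r k) ∨ (r i > r j ∧ r j > r k) then (1:ℤ) else 0) else 0)
      else 0)
    = (if i < j then (if r i < r j then (1:ℤ) else 0) else 0)
        * (∑ k ∈ Finset.range n, if j < k then (if r j < r k then (1:ℤ) else 0) else 0)
      + (if i < j then (if r i > r j then (1:ℤ) else 0) else 0)
        * (∑ k ∈ Finset.range n, if j < k then (if r j > r k then (1:ℤ) else 0) else 0) := by
    intro i
    by_cases hij : i < j
    · simp only [hij, if_true]
      rw [Finset.mul_sum, Finset.mul_sum, ← Finset.sum_add_distrib]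
      refine Finset.sum_congr rfl (fun k _ => ?_)
      split_ifs <;> omega
    · simp [hij]
  calc (∑ i ∈ Finset.range n, if i < j then
          (∑ k ∈ Finset.range n,
            if j < k then (if (r i < r j ∧ r j < r k) ∨ (r i > r j ∧ r j > r k) then (1:ℤ) else 0) else 0)
          else 0)
      = ∑ i ∈ Finset.range n,
          ((if i < j then (if r i < r j then (1:ℤ) else 0) else 0)
            * (∑ k ∈ Finset.range n, if j < k then (if r j < r k then (1:ℤ) else 0) else 0)
          + (if i < j then (if r i > r j then (1:ℤ) else 0) else 0)
            * (∑ k ∈ Finset.range n, if j < k then (if r j > r k then (1:ℤ) else 0) else 0)) :=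
        Finset.sum_congr rfl (fun i _ => key i)
    _ = (∑ i ∈ Finset.range n, if i < j then (if r i < r j then (1:ℤ) else 0) else 0)
          * (∑ k ∈ Finset.range n, if j < k then (if r j < r k then (1:ℤ) else 0) else 0)
        + (∑ i ∈ Finset.range n, if i < j then (if r i > r j then (1:ℤ) else 0) else 0)
          * (∑ k ∈ Finset.range n, if j < k then (if r j > r k then (1:ℤ) else 0) else 0) := by
        rw [Finset.sum_add_distrib, ← Finset.sum_mul, ← Finset.sum_mul]
    _ = pvMid rating j := by
        rw [pv_sum_trunc_lt n j (le_of_lt hjn), pv_sum_trunc_lt n j (le_of_lt hjn),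
            pv_sum_trunc_gt, pv_sum_trunc_gt]
        simp [pvMid, hr, hn]

theorem pv_T_small (rating : List Int) (h : rating.length ≤ 2) :
    pvT rating = 0 := by
  unfold pvT
  refine Finset.sum_eq_zero (fun i hi => Finset.sum_eq_zero (fun j hj => ?_))
  by_cases hij : i < j
  · simp only [hij, if_true]
    refine Finset.sum_eq_zero (fun k hk => ?_)
    simp [Finset.mem_range] at hi hj hk
    rw [if_neg (by omega)]
  · simp [hij]

-- ===== VERDICT (by name: the statement is the Claim_ definition above) =====
theorem numTeams_spec : Claim_equal_numTeams := by
  intro rating _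
  unfold Spec_numTeams
  rw [pv_B_eq, ← pv_T_eq]
  by_cases h : rating.length ≤ 2
  · rw [pv_T_small rating h]
    unfold numTeams
    simp [h]
  · exact pv_A_eq rating h
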